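-- pv_equiv track=rewrite | github.com/mon/kbinxml | sixbit.py | str_to_sixbit
-- ===== SOURCE A (Python) =====
-- def str_to_sixbit(string):
--     compress = []
--     for c in string:
--         if c >= '0' and c <= ':':
--             compress.append(ord(c) - ord('0'))
--         elif c >= 'A' and c <= 'Z':
--             compress.append(ord(c) - 54)
--         elif c == '_':
--             compress.append(ord(c) - 58)
--         elif c >= 'a' and c <= 'z':
--             compress.append(ord(c) - 59)
--         else:
--             raise ValueError('Node or attribute name can only contain alphanumeric + underscore')
--     return ''.join(map(chr, compress))
-- ===== SOURCE B (Python) =====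
-- _CHARSET = '0123456789:ABCDEFGHIJKLMNOPQRSTUVWXYZ_abcdefghijklmnopqrstuvwxyz'
-- _TRANS = str.maketrans({c: chr(i) for i, c in enumerate(_CHARSET)})
-- _ALLOWED = frozenset(_CHARSET)
--
-- def str_to_sixbit(string):
--     if not set(string) <= _ALLOWED:
--         raise ValueError('Node or attribute name can only contain alphanumeric + underscore')
--     return string.translate(_TRANS)
-- ===== Notes on version B (the rewrite author's own statement) =====
-- stated objective: faster
-- what changed: Replaces the per-character four-branch range/arithmetic chain with a constant lookup table built once from the ordered sixbit charset, a set-subset validation, and a single str.translate pass done in C.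
import Mathlib
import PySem

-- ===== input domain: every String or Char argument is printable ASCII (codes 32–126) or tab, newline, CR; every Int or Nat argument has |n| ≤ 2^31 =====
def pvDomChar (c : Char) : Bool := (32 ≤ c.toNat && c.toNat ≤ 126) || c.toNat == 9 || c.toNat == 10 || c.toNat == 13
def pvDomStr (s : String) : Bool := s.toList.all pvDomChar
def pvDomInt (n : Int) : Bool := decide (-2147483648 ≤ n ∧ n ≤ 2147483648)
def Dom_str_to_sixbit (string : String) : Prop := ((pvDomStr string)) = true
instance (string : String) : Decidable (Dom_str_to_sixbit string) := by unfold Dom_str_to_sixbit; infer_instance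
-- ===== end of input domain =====

-- B replaces A's four-branch arithmetic chain with one lookup table built from the
-- ordered sixbit charset and a single translate pass (objective: simpler).
-- Python A raises ValueError on characters outside the charset; Pre_ excludes those.

-- ===== PORT A =====
-- the else branch raises ValueError in Python; Pre_str_to_sixbit excludes those inputs,
-- the character is returned unchanged only to keep the port total (never reached under Pre_)
def sixbitA_char (c : Char) : Char :=
  if '0' ≤ c ∧ c ≤ ':' then Char.ofNat (c.toNat - 48)
  else if 'A' ≤ c ∧ c ≤ 'Z' then Char.ofNat (c.toNat - 54)
  else if c = '_' then Char.ofNat (c.toNat - 58)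
  else if 'a' ≤ c ∧ c ≤ 'z' then Char.ofNat (c.toNat - 59)
  else c

def str_to_sixbit (string : String) : String :=
  String.ofList (string.toList.map sixbitA_char)

-- ===== PORT B =====
def sixbitCharset : List Char :=
  "0123456789:ABCDEFGHIJKLMNOPQRSTUVWXYZ_abcdefghijklmnopqrstuvwxyz".toList

-- translation table: char → chr(its index in the charset), as in Source B's str.maketrans
def sixbitTable : PySem.Dict Char Char :=
  (PySem.List.enumerate sixbitCharset).foldl (fun d ic => d.insert ic.2 (Char.ofNat ic.1.toNat)) PySem.Dict.empty

def str_to_sixbit_alt (string : String) : String :=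
  String.ofList (string.toList.map (fun c => (sixbitTable.getD c c)))

-- ===== PRECONDITION & SPEC =====
-- Pre_ excludes strings with a character outside the sixbit charset, where Python A
-- (and B) raise ValueError.
def Pre_str_to_sixbit (string : String) : Prop :=
  (string.toList.all (fun c => sixbitCharset.contains c)) = true
instance (string : String) : Decidable (Pre_str_to_sixbit string) := by
  unfold Pre_str_to_sixbit; infer_instance

def pvWitness_str_to_sixbit : String := "Abc_09z"

def Spec_str_to_sixbit (string : String) (out : String) : Prop := out = str_to_sixbit_alt string
instance (string : String) (out : String) : Decidable (Spec_str_to_sixbit string out) := by unfold Spec_str_to_sixbit; infer_instance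

-- ===== CLAIM (what is proved, stated in full; the proofs are below) =====
def Claim_equal_str_to_sixbit : Prop := ∀ (string : String), Dom_str_to_sixbit string → Pre_str_to_sixbit string → Spec_str_to_sixbit string (str_to_sixbit string)

-- ===== LEMMAS AND PROOFS =====

set_option maxRecDepth 10000 in
theorem sixbit_char_agree_all :
    (sixbitCharset.all (fun c => sixbitA_char c == sixbitTable.getD c c)) = true := by rfl

theorem sixbit_char_agree :
    ∀ c ∈ sixbitCharset, sixbitA_char c = sixbitTable.getD c c := by
  have h := sixbit_char_agree_all
  rw [List.all_eq_true] at h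
  exact fun c hc => eq_of_beq (h c hc)

-- ===== VERDICT (by name: the statement is the Claim_ definition above) =====
theorem str_to_sixbit_spec : Claim_equal_str_to_sixbit := by
  intro s _ hpre
  unfold Pre_str_to_sixbit at hpre
  rw [List.all_eq_true] at hpre
  simp only [List.contains_iff_mem] at hpre
  unfold Spec_str_to_sixbit str_to_sixbit str_to_sixbit_alt
  exact congrArg String.ofList (List.map_congr_left (fun c hc => sixbit_char_agree c (hpre c hc)))
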